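-- pv_equiv track=rewrite | github.com/roperete/lrs-dashboard | scripts/update_database.py | apply_auto_fills
-- ===== SOURCE A (Python) =====
-- def apply_auto_fills(database, auto_fills):
--     """Apply auto-fills to database"""
--     updates_by_id = {}
--     for af in auto_fills:
--         sim_id = af['sim_id']
--         if sim_id not in updates_by_id:
--             updates_by_id[sim_id] = {}
--         updates_by_id[sim_id][af['field']] = af['value']
--
--     for simulant in database:
--         sim_id = simulant.get('simulant_id', '')
--         if sim_id in updates_by_id:
--             for field, value in updates_by_id[sim_id].items():
--                 simulant[field] = value
--
--     return database
-- ===== SOURCE B (Python) =====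
-- def apply_auto_fills(database, auto_fills):
--     """Apply auto-fills to database"""
--     for simulant in database:
--         sim_id = simulant.get('simulant_id', '')
--         for af in auto_fills:
--             if af['sim_id'] == sim_id:
--                 simulant[af['field']] = af['value']
--     return database
-- ===== Notes on version B (the rewrite author's own statement) =====
-- stated objective: simpler
-- what changed: Drops the grouped updates_by_id index entirely: B scans auto_fills directly for each simulant and applies matching entries in list order, which preserves last-write-wins and field insertion order without building the nested dict.
import Mathlib
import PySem

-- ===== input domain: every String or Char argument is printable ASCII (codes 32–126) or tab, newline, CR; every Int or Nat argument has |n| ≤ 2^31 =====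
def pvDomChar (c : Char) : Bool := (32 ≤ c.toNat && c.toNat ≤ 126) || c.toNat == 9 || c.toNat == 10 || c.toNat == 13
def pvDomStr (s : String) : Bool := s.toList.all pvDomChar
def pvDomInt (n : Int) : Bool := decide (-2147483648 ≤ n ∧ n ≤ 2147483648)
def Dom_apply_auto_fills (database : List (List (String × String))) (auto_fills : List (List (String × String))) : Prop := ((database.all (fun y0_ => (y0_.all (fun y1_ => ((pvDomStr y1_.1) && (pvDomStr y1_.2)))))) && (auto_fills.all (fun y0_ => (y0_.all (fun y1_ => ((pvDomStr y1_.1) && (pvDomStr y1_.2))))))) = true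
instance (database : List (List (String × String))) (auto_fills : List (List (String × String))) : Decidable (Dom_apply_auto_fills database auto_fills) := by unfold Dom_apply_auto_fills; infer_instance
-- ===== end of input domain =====

-- B drops A's grouped updates_by_id index and instead scans auto_fills directly for each
-- simulant, applying matching entries in list order (same return value; like A, B mutates
-- the simulant dicts of `database` in place and returns `database`).

-- ===== PORT A =====
-- one step of A's first loop: group af into updates_by_id (the getD defaults are only
-- reached when a key is missing, where Python raises KeyError — excluded by Pre_)
def pvAFStep (u : PySem.Dict String (PySem.Dict String String)) (af : List (String × String)) : PySem.Dict String (PySem.Dict String String) :=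
  let sid := (PySem.Dict.mk af).getD "sim_id" ""
  let u' := if u.contains sid then u else u.insert sid PySem.Dict.empty
  u'.insert sid (((u'.get? sid).getD PySem.Dict.empty).insert ((PySem.Dict.mk af).getD "field" "") ((PySem.Dict.mk af).getD "value" ""))

-- A's inner loop: `for field, value in ….items(): simulant[field] = value`
def pvApplyItems (s : PySem.Dict String String) (l : List (String × String)) : PySem.Dict String String :=
  l.foldl (fun s p => s.insert p.1 p.2) s

def apply_auto_fills (database : List (List (String × String))) (auto_fills : List (List (String × String))) : List (List (String × String)) :=
  let updates := auto_fills.foldl pvAFStep PySem.Dict.empty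
  database.map (fun simulant =>
    let sid := (PySem.Dict.mk simulant).getD "simulant_id" ""
    match updates.get? sid with
    | some inner => (pvApplyItems (PySem.Dict.mk simulant) inner.items).items
    | none => simulant)

-- ===== PORT B =====
def apply_auto_fills_alt (database : List (List (String × String))) (auto_fills : List (List (String × String))) : List (List (String × String)) :=
  database.map (fun simulant =>
    let sid := (PySem.Dict.mk simulant).getD "simulant_id" ""
    (auto_fills.foldl (fun s af =>
        if (PySem.Dict.mk af).getD "sim_id" "" == sid
        then s.insert ((PySem.Dict.mk af).getD "field" "") ((PySem.Dict.mk af).getD "value" "")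
        else s) (PySem.Dict.mk simulant)).items)

-- ===== PRECONDITION & SPEC =====
-- Pre_ excludes exactly the inputs where Python A raises KeyError: some auto-fill entry
-- missing one of the keys 'sim_id', 'field', 'value'.
def Pre_apply_auto_fills (database : List (List (String × String))) (auto_fills : List (List (String × String))) : Prop :=
  (auto_fills.all (fun af => (PySem.Dict.mk af).contains "sim_id" && (PySem.Dict.mk af).contains "field" && (PySem.Dict.mk af).contains "value")) = true
instance (database : List (List (String × String))) (auto_fills : List (List (String × String))) : Decidable (Pre_apply_auto_fills database auto_fills) := by unfold Pre_apply_auto_fills; infer_instance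

def pvWitness_apply_auto_fills : (List (List (String × String))) × (List (List (String × String))) :=
  ([[("simulant_id", "s1"), ("name", "x")]], [[("sim_id", "s1"), ("field", "name"), ("value", "y")]])

def Spec_apply_auto_fills (database : List (List (String × String))) (auto_fills : List (List (String × String))) (out : List (List (String × String))) : Prop := out = apply_auto_fills_alt database auto_fills
instance (database : List (List (String × String))) (auto_fills : List (List (String × String))) (out : List (List (String × String))) : Decidable (Spec_apply_auto_fills database auto_fills out) := by unfold Spec_apply_auto_fills; infer_instance

-- ===== CLAIM (what is proved, stated in full; the proofs are below) =====
def Claim_equal_apply_auto_fills : Prop := ∀ (database : List (List (String × String))) (auto_fills : List (List (String × String))), Dom_apply_auto_fills database auto_fills → Pre_apply_auto_fills database auto_fills → Spec_apply_auto_fills database auto_fills (apply_auto_fills database auto_fills)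

-- ===== LEMMAS AND PROOFS =====

-- the inner per-sim_id dict A's index holds after processing `afs` (empty if sid absent)
def pvInner (afs : List (List (String × String))) (sid : String) : PySem.Dict String String :=
  ((afs.foldl pvAFStep PySem.Dict.empty).get? sid).getD PySem.Dict.empty

lemma pv_ins_comm (s : PySem.Dict String String) (f g v b : String)
    (hf : f ∈ s.keys) (hne : g ≠ f) :
    (s.insert f v).insert g b = (s.insert g b).insert f v := by
  have hcf : s.contains f = true := (PySem.Dict.contains_iff_mem_keys s f).2 hf
  apply PySem.Dict.ext
  by_cases hg : s.contains g = true
  · have h1 : (s.insert f v).contains g = true := by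
      rw [PySem.Dict.contains_insert]; simp [hg]
    have h2 : (s.insert g b).contains f = true := by
      rw [PySem.Dict.contains_insert]; simp [hcf]
    rw [PySem.Dict.items_insert_of_contains _ _ h1, PySem.Dict.items_insert_of_contains _ _ h2,
        PySem.Dict.items_insert_of_contains _ _ hcf, PySem.Dict.items_insert_of_contains _ _ hg]
    simp only [List.map_map]
    apply List.map_congr_left
    intro p _
    by_cases hp : p.1 = f
    · simp [Function.comp, hp, Ne.symm hne]
    · by_cases hq : p.1 = g <;> simp [Function.comp, hp, hq, hne]
  · have hg' : s.contains g = false := by simpa using hg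
    have h1 : (s.insert f v).contains g = false := by
      rw [PySem.Dict.contains_insert]; simp [hg', hne]
    have h2 : (s.insert g b).contains f = true := by
      rw [PySem.Dict.contains_insert]; simp [hcf]
    rw [PySem.Dict.items_insert_of_not_contains _ _ h1,
        PySem.Dict.items_insert_of_contains _ _ hcf,
        PySem.Dict.items_insert_of_contains _ _ h2,
        PySem.Dict.items_insert_of_not_contains _ _ hg']
    simp [hne]

lemma pv_applyItems_insert_out (f v : String) :
    ∀ (L : List (String × String)) (s : PySem.Dict String String),
      f ∈ s.keys → f ∉ L.map Prod.fst →
      (pvApplyItems s L).insert f v = pvApplyItems (s.insert f v) L := by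
  intro L
  induction L with
  | nil => intro s _ _; rfl
  | cons p L ih =>
    intro s hf hL
    obtain ⟨g, b⟩ := p
    simp only [List.map_cons, List.mem_cons, not_or] at hL
    have hg : g ≠ f := Ne.symm hL.1
    have e1 : pvApplyItems s ((g, b) :: L) = pvApplyItems (s.insert g b) L := rfl
    have e2 : pvApplyItems (s.insert f v) ((g, b) :: L) = pvApplyItems ((s.insert f v).insert g b) L := rfl
    rw [e1, e2, ih _ ((PySem.Dict.mem_keys_insert s g f b).2 (Or.inr hf)) hL.2,
        pv_ins_comm s f g v b hf hg]

lemma pv_map_rep_id (f v : String) (L : List (String × String)) (h : f ∉ L.map Prod.fst) :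
    L.map (fun p => if p.1 == f then (f, v) else p) = L := by
  induction L with
  | nil => rfl
  | cons p L ih =>
    simp only [List.map_cons, List.mem_cons, List.map_cons] at h ⊢
    rw [not_or] at h
    rw [if_neg (by simp; exact fun hh => h.1 hh.symm), ih (by simpa using h.2)]

lemma pv_applyItems_dictInsert (d : PySem.Dict String String) (hnd : d.keys.Nodup)
    (s : PySem.Dict String String) (f v : String) :
    pvApplyItems s (d.insert f v).items = (pvApplyItems s d.items).insert f v := by
  by_cases hc : d.contains f = true
  · have hfk : f ∈ d.keys := (PySem.Dict.contains_iff_mem_keys d f).1 hc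
    simp only [PySem.Dict.keys] at hfk
    obtain ⟨⟨f', a⟩, hmem, hfst⟩ := List.mem_map.1 hfk
    simp only at hfst
    subst hfst
    obtain ⟨L1, L2, hsplit⟩ := List.append_of_mem hmem
    have hnd' := hnd
    simp only [PySem.Dict.keys, hsplit, List.map_append, List.map_cons, List.nodup_append,
      List.nodup_cons] at hnd'
    have hf1 : f' ∉ L1.map Prod.fst := fun hx => (hnd'.2.2 f' hx f' (by simp)) rfl
    have hf2 : f' ∉ L2.map Prod.fst := hnd'.2.1.1
    rw [PySem.Dict.items_insert_of_contains _ _ hc, hsplit, List.map_append, List.map_cons,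
        pv_map_rep_id f' v L1 hf1, pv_map_rep_id f' v L2 hf2]
    simp only [BEq.rfl, if_pos]
    have e1 : pvApplyItems s (L1 ++ (f', v) :: L2) = pvApplyItems ((pvApplyItems s L1).insert f' v) L2 := by
      simp [pvApplyItems, List.foldl_append]
    have e2 : pvApplyItems s (L1 ++ (f', a) :: L2) = pvApplyItems ((pvApplyItems s L1).insert f' a) L2 := by
      simp [pvApplyItems, List.foldl_append]
    rw [e1, e2, pv_applyItems_insert_out f' v L2 _
          ((PySem.Dict.mem_keys_insert _ f' f' a).2 (Or.inl rfl)) hf2,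
        PySem.Dict.insert_insert_self]
  · rw [PySem.Dict.items_insert_of_not_contains _ _ (by simpa using hc)]
    simp [pvApplyItems, List.foldl_append]

lemma pv_inner_snoc (afs : List (List (String × String))) (af : List (String × String)) (sid : String) :
    pvInner (afs ++ [af]) sid =
      if sid = (PySem.Dict.mk af).getD "sim_id" ""
      then (pvInner afs sid).insert ((PySem.Dict.mk af).getD "field" "") ((PySem.Dict.mk af).getD "value" "")
      else pvInner afs sid := by
  have hstep : ∀ (u : PySem.Dict String (PySem.Dict String String)),
      (pvAFStep u af).get? sid =
        if sid = (PySem.Dict.mk af).getD "sim_id" ""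
        then some (((u.get? ((PySem.Dict.mk af).getD "sim_id" "")).getD PySem.Dict.empty).insert
          ((PySem.Dict.mk af).getD "field" "") ((PySem.Dict.mk af).getD "value" ""))
        else u.get? sid := by
    intro u
    simp only [pvAFStep]
    by_cases hc : u.contains ((PySem.Dict.mk af).getD "sim_id" "") = true
    · rw [if_pos hc, PySem.Dict.get?_insert]
    · rw [if_neg hc, PySem.Dict.get?_insert]
      have hn : u.get? ((PySem.Dict.mk af).getD "sim_id" "") = none :=
        (PySem.Dict.get?_eq_none_iff_contains u _).2 (by simpa using hc)
      by_cases h : sid = (PySem.Dict.mk af).getD "sim_id" ""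
      · simp [h, PySem.Dict.get?_insert_self, hn]
      · simp [h, PySem.Dict.get?_insert]
  unfold pvInner
  rw [List.foldl_append, List.foldl_cons, List.foldl_nil, hstep]
  by_cases h : sid = (PySem.Dict.mk af).getD "sim_id" "" <;> simp [h]

lemma pv_inner_nodup (afs : List (List (String × String))) (sid : String) :
    (pvInner afs sid).keys.Nodup := by
  induction afs using List.reverseRecOn with
  | nil =>
    have : pvInner [] sid = PySem.Dict.empty := rfl
    rw [this]
    exact PySem.Dict.nodup_keys_empty
  | append_singleton afs af ih =>
    rw [pv_inner_snoc]
    split_ifs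
    · exact PySem.Dict.nodup_keys_insert _ _ _ ih
    · exact ih

lemma pv_bfold_eq (afs : List (List (String × String))) (sid : String) (s : PySem.Dict String String) :
    afs.foldl (fun s af =>
        if (PySem.Dict.mk af).getD "sim_id" "" == sid
        then s.insert ((PySem.Dict.mk af).getD "field" "") ((PySem.Dict.mk af).getD "value" "")
        else s) s = pvApplyItems s (pvInner afs sid).items := by
  induction afs using List.reverseRecOn with
  | nil => rfl
  | append_singleton afs af ih =>
    rw [List.foldl_append, List.foldl_cons, List.foldl_nil, ih, pv_inner_snoc]
    by_cases h : (PySem.Dict.mk af).getD "sim_id" "" = sid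
    · rw [if_pos (by simpa using h), if_pos h.symm,
          pv_applyItems_dictInsert _ (pv_inner_nodup afs sid) s]
    · rw [if_neg (by simpa using h), if_neg (fun hh => h hh.symm)]

-- ===== VERDICT (by name: the statement is the Claim_ definition above) =====
theorem apply_auto_fills_spec : Claim_equal_apply_auto_fills := by
  intro database auto_fills _hdom _hpre
  unfold Spec_apply_auto_fills apply_auto_fills apply_auto_fills_alt
  apply List.map_congr_left
  intro sim _
  dsimp only
  rw [pv_bfold_eq auto_fills ((PySem.Dict.mk sim).getD "simulant_id" "") (PySem.Dict.mk sim)]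
  cases hq : (auto_fills.foldl pvAFStep PySem.Dict.empty).get? ((PySem.Dict.mk sim).getD "simulant_id" "") with
  | none =>
    have hi : pvInner auto_fills ((PySem.Dict.mk sim).getD "simulant_id" "") = PySem.Dict.empty := by
      unfold pvInner; rw [hq]; rfl
    rw [hi]
    rfl
  | some inner =>
    have hi : pvInner auto_fills ((PySem.Dict.mk sim).getD "simulant_id" "") = inner := by
      unfold pvInner; rw [hq]; rfl
    rw [hi]
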